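-- pv_equiv track=rewrite | github.com/FingalP/foodsteps-interview | backend/solution.py | make_minimal
-- ===== SOURCE A (Python) =====
-- def make_minimal(word):
--     """
--     Removes certain special characters from a string and converts it to lowercase.
--
--     Args:
--         word (str): The string to be processed.
--
--     Returns:
--         str: The processed string.
--     """
--     for char in [
--         "'",
--         '"',
--         " ",
--         "(",
--         ")",
--         "-",
--         "_",
--         ",",
--         ".",
--         "/",
--         ">",
--         "+",
--         "–",
--         "’",
--         "!",
--         "…",
--         "=",
--     ]:
--         word = word.replace(char, "")
--     return word.strip().lower()
-- ===== SOURCE B (Python) =====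
-- EXCLUDE = frozenset("'\" ()-_,./>+\u2013\u2019!\u2026=")
--
--
-- def make_minimal(word):
--     """Single pass over the string: drop blacklisted characters, then strip and lowercase."""
--     return "".join(c for c in word if c not in EXCLUDE).strip().lower()
-- ===== Notes on version B (the rewrite author's own statement) =====
-- stated objective: idiomatic
-- what changed: Replaces the 17 sequential word.replace scans with one single-pass filter against a frozenset of the blacklisted characters, keeping the trailing strip().lower().
import Mathlib
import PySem

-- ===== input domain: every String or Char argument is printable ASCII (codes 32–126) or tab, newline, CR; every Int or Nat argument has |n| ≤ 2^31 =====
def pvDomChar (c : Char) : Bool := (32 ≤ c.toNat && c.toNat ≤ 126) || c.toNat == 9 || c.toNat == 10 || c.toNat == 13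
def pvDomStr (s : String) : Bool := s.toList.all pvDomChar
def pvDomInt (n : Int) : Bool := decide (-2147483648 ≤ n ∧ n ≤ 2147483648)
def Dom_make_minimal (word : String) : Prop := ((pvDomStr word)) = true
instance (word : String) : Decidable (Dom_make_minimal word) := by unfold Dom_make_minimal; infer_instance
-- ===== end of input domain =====

-- B replaces A's 17 sequential `word.replace` scans with one single-pass filter
-- against a set of the blacklisted characters (objective: idiomatic one-pass form).

-- ===== PORT A =====
-- the 17 string literals A loops over, in A's order
def pvSpecials : List String :=
  ["'", "\"", " ", "(", ")", "-", "_", ",", ".", "/", ">", "+", "–", "’", "!", "…", "="]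

def make_minimal (word : String) : String :=
  PySem.Str.lower (PySem.Str.strip
    (pvSpecials.foldl (fun w c => PySem.Str.replace w c "") word))

-- ===== PORT B =====
-- B's frozenset EXCLUDE, as the list of its distinct characters
def pvExclude : List Char :=
  ['\'', '"', ' ', '(', ')', '-', '_', ',', '.', '/', '>', '+', '–', '’', '!', '…', '=']

def make_minimal_alt (word : String) : String :=
  PySem.Str.lower (PySem.Str.strip (String.ofList
    (PySem.Chars.join [] ((word.toList.filter (fun c => !(pvExclude.contains c))).map (fun c => [c])))))

-- ===== PRECONDITION & SPEC =====
def Spec_make_minimal (word : String) (out : String) : Prop := out = make_minimal_alt word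
instance (word : String) (out : String) : Decidable (Spec_make_minimal word out) := by unfold Spec_make_minimal; infer_instance

-- ===== CLAIM (what is proved, stated in full; the proofs are below) =====
def Claim_equal_make_minimal : Prop := ∀ (word : String), Dom_make_minimal word → Spec_make_minimal word (make_minimal word)

-- ===== LEMMAS AND PROOFS =====

-- replace.go with a single-char pattern and empty replacement is a filter
theorem pv_go_filter (c : Char) (l : List Char) : ∀ (fuel : Nat) (acc : List Char), l.length ≤ fuel →
    PySem.Chars.replace.go [c] [] fuel l acc = acc.reverse ++ l.filter (fun x => x ≠ c) := by
  induction l with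
  | nil => intro fuel acc _; cases fuel <;> simp [PySem.Chars.replace.go]
  | cons h t ih =>
    intro fuel acc hf
    cases fuel with
    | zero => simp at hf
    | succ f =>
      by_cases hc : h = c
      · subst hc
        simp [PySem.Chars.replace.go, List.isPrefixOf, ih f acc (by simpa using hf)]
      · simp [PySem.Chars.replace.go, List.isPrefixOf, hc, ih f (h :: acc) (by simpa using hf), Ne.symm hc]

theorem pv_replace_single (c : Char) (cs : List Char) :
    PySem.Chars.replace cs [c] [] = cs.filter (fun x => x ≠ c) := by
  simp [PySem.Chars.replace, pv_go_filter]

-- folding single-char replaces over a char list is one filter against that list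
theorem pv_foldl_replace (cl : List Char) : ∀ (w : String),
    ((cl.map (fun c => String.ofList [c])).foldl (fun s t => PySem.Str.replace s t "") w).toList
      = w.toList.filter (fun x => !(cl.contains x)) := by
  induction cl with
  | nil => intro w; simp
  | cons c cl ih =>
    intro w
    have h1 : (PySem.Str.replace w (String.ofList [c]) "").toList
        = w.toList.filter (fun x => x ≠ c) := by
      simp [PySem.Str.replace, pv_replace_single]
    simp only [List.map_cons, List.foldl_cons, ih, h1, List.filter_filter]
    apply List.filter_congr
    intro x _
    by_cases hx : x = c <;> simp [hx]

theorem pv_sides_toList (word : String) :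
    (pvSpecials.foldl (fun w c => PySem.Str.replace w c "") word).toList
      = PySem.Chars.join [] ((word.toList.filter (fun c => !(pvExclude.contains c))).map (fun c => [c])) := by
  have hs : pvSpecials = pvExclude.map (fun c => String.ofList [c]) := by decide
  rw [hs, pv_foldl_replace, PySem.Chars.join_nil_singletons]

-- ===== VERDICT (by name: the statement is the Claim_ definition above) =====
theorem make_minimal_spec : Claim_equal_make_minimal := by
  intro word _
  unfold Spec_make_minimal make_minimal make_minimal_alt
  rw [PySem.Str.strip, PySem.Str.strip, ← pv_sides_toList]
  simp
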